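-- pv_equiv track=rewrite | github.com/GeorgeM-K/advent_of_code_2022 | day9/program.py | is_adjacent
-- ===== SOURCE A (Python) =====
-- def is_adjacent(h, t):
--     dx = [1,1,1,-1,-1,-1,0,0]
--     dy = [1,-1,0,1,-1,0,1,-1]
--     #start at h
--     if h == t:
--         return True
--     for i in range(len(dx)):
--         temp = (h[0]+dx[i], h[1]+dy[i])
--         if temp == t:
--             return True
--     return False
-- ===== SOURCE B (Python) =====
-- def is_adjacent(h, t):
--     return abs(h[0] - t[0]) <= 1 and abs(h[1] - t[1]) <= 1
-- ===== Notes on version B (the rewrite author's own statement) =====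
-- stated objective: idiomatic
-- what changed: Replaced the 8-neighbor offset enumeration (plus h==t guard) with the closed-form Chebyshev-distance test on the two coordinate differences.
import Mathlib
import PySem

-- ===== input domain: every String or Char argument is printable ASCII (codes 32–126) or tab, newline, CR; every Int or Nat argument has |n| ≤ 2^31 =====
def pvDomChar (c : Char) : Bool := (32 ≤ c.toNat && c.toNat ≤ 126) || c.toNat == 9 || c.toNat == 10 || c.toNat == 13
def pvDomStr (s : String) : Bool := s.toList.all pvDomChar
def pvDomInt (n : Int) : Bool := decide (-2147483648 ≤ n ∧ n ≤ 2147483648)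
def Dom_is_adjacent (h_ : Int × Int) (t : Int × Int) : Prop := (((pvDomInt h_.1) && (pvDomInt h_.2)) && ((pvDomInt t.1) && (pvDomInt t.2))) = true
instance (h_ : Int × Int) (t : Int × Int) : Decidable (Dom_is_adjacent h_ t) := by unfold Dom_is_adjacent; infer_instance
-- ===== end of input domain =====

-- B replaces A's 8-neighbor offset enumeration with the closed-form Chebyshev-distance test (idiomatic; same O(1) cost).


-- ===== PORT A =====
-- literal port of A: h==t guard, then scan the 8 (dx,dy) offsets in order
def is_adjacent (h_ : Int × Int) (t : Int × Int) : Bool :=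
  let dx : List Int := [1, 1, 1, -1, -1, -1, 0, 0]
  let dy : List Int := [1, -1, 0, 1, -1, 0, 1, -1]
  if h_ = t then true
  else (List.range dx.length).any fun i =>
    let temp := (h_.1 + dx.getD i 0, h_.2 + dy.getD i 0)
    temp = t

-- ===== PORT B =====
-- B: closed-form Chebyshev-distance test
def is_adjacent_alt (h_ : Int × Int) (t : Int × Int) : Bool :=
  (h_.1 - t.1).natAbs ≤ 1 && (h_.2 - t.2).natAbs ≤ 1

-- ===== PRECONDITION & SPEC =====
def Spec_is_adjacent (h_ : Int × Int) (t : Int × Int) (out : Bool) : Prop := out = is_adjacent_alt h_ t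
instance (h_ : Int × Int) (t : Int × Int) (out : Bool) : Decidable (Spec_is_adjacent h_ t out) := by unfold Spec_is_adjacent; infer_instance

-- ===== CLAIM (what is proved, stated in full; the proofs are below) =====
def Claim_equal_is_adjacent : Prop := ∀ (h_ : Int × Int) (t : Int × Int), Dom_is_adjacent h_ t → Spec_is_adjacent h_ t (is_adjacent h_ t)

-- ===== LEMMAS AND PROOFS =====

-- ===== VERDICT (by name: the statement is the Claim_ definition above) =====
theorem is_adjacent_spec : Claim_equal_is_adjacent := by
  intro h_ t _
  unfold Spec_is_adjacent
  obtain ⟨hx, hy⟩ := h_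
  obtain ⟨tx, ty⟩ := t
  simp only [is_adjacent, is_adjacent_alt]
  rw [Bool.eq_iff_iff]
  simp [List.range_succ, Prod.ext_iff]
  omega
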